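-- pv_equiv track=rewrite | github.com/posl/comment_recommendation | script/split_gen/2_time/en/117_C/7.py | solve
-- ===== SOURCE A (Python) =====
-- def solve(N,M,X):
--     X.sort()
--     if N >= M:
--         return 0
--     else:
--         X_diff = [X[i+1] - X[i] for i in range(M-1)]
--         X_diff.sort()
--         return sum(X_diff[:M-N])
-- ===== SOURCE B (Python) =====
-- def _insert(top, g):
--     j = 0
--     while j < len(top) and top[j] < g:
--         j += 1
--     return top[:j] + [g] + top[j:]
--
-- def solve(N, M, X):
--     X.sort()
--     if N >= M or M < 2:
--         return 0
--     k = N - 1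
--     top = []  # ascending buffer holding the k largest gaps seen so far
--     for i in range(M - 1):
--         g = X[i + 1] - X[i]
--         if len(top) < k:
--             top = _insert(top, g)
--         elif top and top[0] < g:
--             top = _insert(top[1:], g)
--     return (X[M - 1] - X[0]) - sum(top)
-- ===== Notes on version B (the rewrite author's own statement) =====
-- stated objective: alternative
-- what changed: B computes the answer complementarily: span of the sorted points minus the N-1 largest gaps, maintained incrementally in a bounded ordered top-k buffer during a single pass over the gaps, instead of A's build-all-gaps, full sort, and sum of the smallest M-N.
import Mathlib
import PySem

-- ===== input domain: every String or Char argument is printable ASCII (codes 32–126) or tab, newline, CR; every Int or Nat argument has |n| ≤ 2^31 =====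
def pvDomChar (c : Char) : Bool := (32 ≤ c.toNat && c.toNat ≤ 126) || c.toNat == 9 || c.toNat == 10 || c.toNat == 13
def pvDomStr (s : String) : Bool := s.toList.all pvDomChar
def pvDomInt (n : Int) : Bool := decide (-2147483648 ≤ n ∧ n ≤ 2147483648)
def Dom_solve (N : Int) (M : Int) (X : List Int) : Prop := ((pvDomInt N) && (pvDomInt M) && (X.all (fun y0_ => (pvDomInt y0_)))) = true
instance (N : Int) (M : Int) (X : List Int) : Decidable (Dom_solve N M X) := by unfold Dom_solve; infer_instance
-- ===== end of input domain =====

-- B computes the answer complementarily (span minus the N-1 largest gaps, kept in an incrementally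
-- maintained top-k buffer) instead of sorting all gaps and summing the smallest M-N; both A and B
-- sort X in place in Python (same side effect), the equivalence proved is about the return value.

-- ===== PORT A =====
def solve (N : Int) (M : Int) (X : List Int) : Int :=
  let ys := PySem.List.sorted X (fun x => x) false
  if N ≥ M then 0
  else
    let diffs := (PySem.List.pyRange 0 (M - 1) 1).map
      (fun i => PySem.List.pyGetD ys (i + 1) 0 - PySem.List.pyGetD ys i 0)
    let d2 := PySem.List.sorted diffs (fun x => x) false
    (PySem.List.slice d2 none (some (M - N))).sum

-- ===== PORT B =====
-- _insert: ordered insertion into the ascending buffer (hand-written while loop in Source B)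
def insertAsc : List Int → Int → List Int
  | [], g => [g]
  | x :: xs, g => if x < g then x :: insertAsc xs g else g :: x :: xs

def solve_alt (N : Int) (M : Int) (X : List Int) : Int :=
  let ys := PySem.List.sorted X (fun x => x) false
  if N ≥ M ∨ M < 2 then 0
  else
    let k := N - 1
    let top := (PySem.List.pyRange 0 (M - 1) 1).foldl
      (fun top i =>
        let g := PySem.List.pyGetD ys (i + 1) 0 - PySem.List.pyGetD ys i 0
        if (top.length : Int) < k then insertAsc top g
        else if top ≠ [] ∧ top.headD 0 < g then insertAsc (top.drop 1) g
        else top) []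
    (PySem.List.pyGetD ys (M - 1) 0 - PySem.List.pyGetD ys 0 0) - top.sum

-- ===== PRECONDITION & SPEC =====
-- Pre_ excludes exactly the inputs where Python A raises IndexError: N < M with 2 ≤ M and M > len(X)
-- (the comprehension then reads X[M-1] past the end). A is total everywhere else.
def Pre_solve (N : Int) (M : Int) (X : List Int) : Prop :=
  N ≥ M ∨ M ≤ 1 ∨ M ≤ (X.length : Int)
instance (N : Int) (M : Int) (X : List Int) : Decidable (Pre_solve N M X) := by
  unfold Pre_solve; infer_instance
def pvWitness_solve : Int × Int × List Int := (1, 3, [1, 5, 6])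

def Spec_solve (N : Int) (M : Int) (X : List Int) (out : Int) : Prop := out = solve_alt N M X
instance (N : Int) (M : Int) (X : List Int) (out : Int) : Decidable (Spec_solve N M X out) := by unfold Spec_solve; infer_instance

-- ===== CLAIM (what is proved, stated in full; the proofs are below) =====
def Claim_equal_solve : Prop := ∀ (N : Int) (M : Int) (X : List Int), Dom_solve N M X → Pre_solve N M X → Spec_solve N M X (solve N M X)

-- ===== LEMMAS AND PROOFS =====

theorem insertAsc_perm (s : List Int) (g : Int) : (insertAsc s g).Perm (g :: s) := by
  induction s with
  | nil => simp [insertAsc]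
  | cons x xs ih =>
      simp only [insertAsc]
      split
      · exact ((ih.cons x).trans (List.Perm.swap g x xs))
      · exact List.Perm.refl _

theorem insertAsc_sorted (s : List Int) (g : Int) (hs : s.Pairwise (· ≤ ·)) :
    (insertAsc s g).Pairwise (· ≤ ·) := by
  induction s with
  | nil => simp [insertAsc]
  | cons x xs ih =>
      rw [List.pairwise_cons] at hs
      simp only [insertAsc]
      split
      · rename_i hlt
        refine List.pairwise_cons.2 ⟨?_, ih hs.2⟩
        intro y hy
        rcases List.mem_cons.1 (((insertAsc_perm xs g).mem_iff).1 hy) with h | h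
        · subst h; exact le_of_lt hlt
        · exact hs.1 y h
      · rename_i hge
        refine List.pairwise_cons.2 ⟨?_, List.pairwise_cons.2 hs⟩
        intro y hy
        rcases List.mem_cons.1 hy with h | h
        · subst h; exact le_of_not_gt hge
        · exact le_trans (le_of_not_gt hge) (hs.1 y h)

theorem insertAsc_length (s : List Int) (g : Int) : (insertAsc s g).length = s.length + 1 :=
  (insertAsc_perm s g).length_eq

-- CORE (a): the inserted element lands after position d when s[d] < g
theorem insertAsc_drop_lt (s : List Int) (g : Int) (d : Nat) (hd : d < s.length)
    (hs : s.Pairwise (· ≤ ·)) (h : s[d] < g) :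
    (insertAsc s g).drop (d + 1) = insertAsc (s.drop (d + 1)) g := by
  induction s generalizing d with
  | nil => simp at hd
  | cons x xs ih =>
      rw [List.pairwise_cons] at hs
      cases d with
      | zero =>
          simp only [List.getElem_cons_zero] at h
          simp [insertAsc, h]
      | succ e =>
          simp only [List.getElem_cons_succ] at h
          have he : e < xs.length := by simpa using hd
          have hx : x < g := lt_of_le_of_lt (hs.1 _ (xs.getElem_mem he)) h
          simp only [insertAsc, if_pos hx, List.drop_succ_cons]
          exact ih e he hs.2 h

-- CORE (b): nothing below position d moves when g ≤ s[d]
theorem insertAsc_drop_ge (s : List Int) (g : Int) (d : Nat) (hd : d < s.length)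
    (hs : s.Pairwise (· ≤ ·)) (h : ¬ s[d] < g) :
    (insertAsc s g).drop (d + 1) = s.drop d := by
  induction s generalizing d with
  | nil => simp at hd
  | cons x xs ih =>
      rw [List.pairwise_cons] at hs
      cases d with
      | zero =>
          simp only [List.getElem_cons_zero] at h
          simp [insertAsc, h]
      | succ e =>
          simp only [List.getElem_cons_succ] at h
          have he : e < xs.length := by simpa using hd
          by_cases hx : x < g
          · simp only [insertAsc, if_pos hx, List.drop_succ_cons]
            exact ih e he hs.2 h
          · simp only [insertAsc, if_neg hx]
            simp

-- the loop body of B, with k fixed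
def stepB (k : Int) (buf : List Int) (g : Int) : List Int :=
  if (buf.length : Int) < k then insertAsc buf g
  else if buf ≠ [] ∧ buf.headD 0 < g then insertAsc (buf.drop 1) g
  else buf

theorem stepB_topk (k : Int) (s : List Int) (g : Int) (hs : s.Pairwise (· ≤ ·)) :
    stepB k (s.drop (s.length - k.toNat)) g = (insertAsc s g).drop (s.length + 1 - k.toNat) := by
  unfold stepB
  by_cases hk0 : k ≤ 0
  · have hkN : k.toNat = 0 := Int.toNat_of_nonpos hk0
    rw [hkN]
    simp only [Nat.sub_zero, List.drop_length]
    rw [if_neg (by simp; omega), if_neg (by simp)]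
    rw [List.drop_eq_nil_of_le (by rw [insertAsc_length])]
  · have hkpos : 0 < k := lt_of_not_ge hk0
    have hkc : ((k.toNat : Int)) = k := Int.toNat_of_nonneg (le_of_lt hkpos)
    by_cases hn : s.length < k.toNat
    · rw [Nat.sub_eq_zero_of_le (le_of_lt hn), List.drop_zero]
      rw [if_pos (by rw [← hkc]; exact_mod_cast hn)]
      rw [Nat.sub_eq_zero_of_le (by omega), List.drop_zero]
    · have hle : k.toNat ≤ s.length := le_of_not_gt hn
      have hk1 : 1 ≤ k.toNat := by omega
      set d := s.length - k.toNat with hd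
      have hdlen : (s.drop d).length = k.toNat := by simp [hd]; omega
      have hdlt : d < s.length := by omega
      rw [if_neg (by rw [hdlen, hkc]; omega)]
      have hne : s.drop d ≠ [] := by
        intro h; rw [h] at hdlen; simp at hdlen; omega
      have hhead : (s.drop d).headD 0 = s[d] := by
        rw [List.headD_eq_head?_getD, List.head?_drop, List.getElem?_eq_getElem hdlt]
        rfl
      have harith : s.length + 1 - k.toNat = d + 1 := by omega
      rw [harith]
      by_cases hg : s[d] < g
      · rw [if_pos ⟨hne, by rw [hhead]; exact hg⟩]
        rw [List.drop_drop, insertAsc_drop_lt s g d hdlt hs hg]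
      · rw [if_neg (by rintro ⟨-, h⟩; rw [hhead] at h; exact hg h)]
        rw [insertAsc_drop_ge s g d hdlt hs hg]

theorem foldl_stepB_topk (k : Int) (R s : List Int) (hs : s.Pairwise (· ≤ ·)) :
    R.foldl (stepB k) (s.drop (s.length - k.toNat)) =
      (R.foldl insertAsc s).drop (s.length + R.length - k.toNat) := by
  induction R generalizing s with
  | nil => simp
  | cons g R ih =>
      simp only [List.foldl_cons]
      rw [stepB_topk k s g hs, ← insertAsc_length s g]
      rw [ih (insertAsc s g) (insertAsc_sorted s g hs)]
      congr 1
      simp only [List.length_cons, insertAsc_length]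
      omega

theorem foldl_insertAsc_perm (L : List Int) (s : List Int) :
    (L.foldl insertAsc s).Perm (s ++ L) := by
  induction L generalizing s with
  | nil => simp
  | cons g L ih =>
      simp only [List.foldl_cons]
      refine (ih (insertAsc s g)).trans ?_
      refine (((insertAsc_perm s g).append_right L).trans ?_)
      exact (List.perm_middle).symm

theorem foldl_insertAsc_pairwise (L : List Int) (s : List Int) (hs : s.Pairwise (· ≤ ·)) :
    (L.foldl insertAsc s).Pairwise (· ≤ ·) := by
  induction L generalizing s with
  | nil => exact hs
  | cons g L ih => exact ih _ (insertAsc_sorted s g hs)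

theorem foldl_insertAsc_eq_sorted (L : List Int) :
    L.foldl insertAsc [] = PySem.List.sorted L (fun x => x) false := by
  have hp : (L.foldl insertAsc []).Perm L := by simpa using foldl_insertAsc_perm L []
  have hw := foldl_insertAsc_pairwise L [] (by simp)
  exact (PySem.List.sorted_id_eq_of_perm_of_pairwise L _ hp hw).symm

-- telescoping: the consecutive-gap sum over range m is f(m) - f(0), for any f
theorem telescope_sum (f : Nat → Int) (m : Nat) :
    ((List.range m).map (fun i => f (i + 1) - f i)).sum = f m - f 0 := by
  induction m with
  | zero => simp
  | succ m ih => rw [List.range_succ]; simp [ih]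

theorem gaps_eq (ys : List Int) (m : Int) :
    (PySem.List.pyRange 0 m 1).map (fun i => PySem.List.pyGetD ys (i + 1) 0 - PySem.List.pyGetD ys i 0)
      = (List.range m.toNat).map (fun j => ys.getD (j + 1) 0 - ys.getD j 0) := by
  rw [PySem.List.pyRange_one, List.map_map, Int.sub_zero]
  refine List.map_congr_left fun j hj => ?_
  simp only [Function.comp, zero_add]
  have h1 : ((j : Int) + 1) = ((j + 1 : Nat) : Int) := by push_cast; ring
  rw [h1, PySem.List.pyGetD_natCast, PySem.List.pyGetD_natCast]

theorem foldB_eq (ys : List Int) (m K : Int) :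
    (PySem.List.pyRange 0 m 1).foldl
        (fun top i =>
          let g := PySem.List.pyGetD ys (i + 1) 0 - PySem.List.pyGetD ys i 0
          if (top.length : Int) < K then insertAsc top g
          else if top ≠ [] ∧ top.headD 0 < g then insertAsc (top.drop 1) g
          else top) []
      = ((List.range m.toNat).map (fun j => ys.getD (j + 1) 0 - ys.getD j 0)).foldl (stepB K) [] := by
  rw [List.foldl_map, PySem.List.pyRange_one, Int.sub_zero, List.foldl_map]
  have hb : (fun (top : List Int) (j : Nat) =>
        stepB K top (PySem.List.pyGetD ys ((0 + (j : Int)) + 1) 0 - PySem.List.pyGetD ys (0 + (j : Int)) 0))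
      = (fun (top : List Int) (j : Nat) => stepB K top (ys.getD (j + 1) 0 - ys.getD j 0)) := by
    funext top j
    congr 1
    simp only [zero_add]
    have h1 : ((j : Int) + 1) = ((j + 1 : Nat) : Int) := by push_cast; ring
    rw [h1, PySem.List.pyGetD_natCast, PySem.List.pyGetD_natCast]
  exact congrArg (fun f => List.foldl f ([] : List Int) (List.range m.toNat)) hb

-- ===== VERDICT (by name: the statement is the Claim_ definition above) =====
theorem solve_spec : Claim_equal_solve := by
  intro N M X _ _
  unfold Spec_solve
  simp only [solve, solve_alt]
  by_cases hNM : N ≥ M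
  · rw [if_pos hNM, if_pos (Or.inl hNM)]
  · rw [if_neg hNM]
    have hNM' : N < M := lt_of_not_ge hNM
    by_cases hM2 : M < 2
    · rw [if_pos (Or.inr hM2)]
      rw [PySem.List.pyRange_one_eq_nil (by omega), List.map_nil]
      rw [(PySem.List.sorted_eq_nil_iff ([] : List Int) _ false).2 rfl]
      rw [PySem.List.slice_to _ (show (0:Int) ≤ M - N by omega)]
      simp
    · rw [if_neg (not_or.mpr ⟨hNM, hM2⟩)]
      rw [gaps_eq _ (M - 1), foldB_eq _ (M - 1) (N - 1)]
      set ys := PySem.List.sorted X (fun x => x) false with hys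
      set L := (List.range (M - 1).toNat).map (fun j => ys.getD (j + 1) 0 - ys.getD j 0) with hL
      have htop : L.foldl (stepB (N - 1)) [] =
          (PySem.List.sorted L (fun x => x) false).drop (L.length - (N - 1).toNat) := by
        have h0 := foldl_stepB_topk (N - 1) L [] (by simp)
        simpa [foldl_insertAsc_eq_sorted] using h0
      rw [htop]
      have hm1 : (((M - 1).toNat : Int)) = M - 1 := Int.toNat_of_nonneg (by omega)
      have hspan : PySem.List.pyGetD ys (M - 1) 0 - PySem.List.pyGetD ys 0 0 = L.sum := by
        rw [hL, telescope_sum (fun j => ys.getD j 0)]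
        rw [← hm1, PySem.List.pyGetD_natCast]
        have h0 : ((0 : Int)) = ((0 : Nat) : Int) := rfl
        rw [h0, PySem.List.pyGetD_natCast]
        simp
      rw [hspan]
      rw [PySem.List.slice_to _ (show (0:Int) ≤ M - N by omega)]
      set S := PySem.List.sorted L (fun x => x) false with hS
      have hperm : S.Perm L := PySem.List.sorted_perm L _ false
      have hsum : S.sum = L.sum := hperm.sum_eq
      have hlen : S.length = L.length := hperm.length_eq
      have hLlen : L.length = (M - 1).toNat := by simp [hL]
      by_cases hN1 : 1 ≤ N
      · have ht : (M - N).toNat = L.length - (N - 1).toNat := by rw [hLlen]; omega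
        rw [ht]
        have hsplit := List.sum_take_add_sum_drop S (L.length - (N - 1).toNat)
        omega
      · have hk0 : (N - 1).toNat = 0 := by omega
        rw [hk0, Nat.sub_zero, ← hlen, List.drop_length]
        rw [List.take_of_length_le (by rw [hlen, hLlen]; omega)]
        simp [hsum]
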